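-- pv_equiv track=rewrite | github.com/wsi1212/BAEKJOON | NYPC2023/round2-b/P1.py | get_bracket_count
-- ===== SOURCE A (Python) =====
-- def get_near_bracket(bracket, i):
--     currency = i
--     if currency >= len(bracket):
--         return len(bracket) - 1
--     while bracket[currency] == '0' and currency < len(bracket) - 1:
--         currency += 1
--     return currency
--
-- def is_empty(bracket):
--     for i in range(len(bracket) - 1):
--         if bracket[i] == '(' and bracket[get_near_bracket(bracket, i + 1)] == ')':
--             return True
--     return False
--
-- def get_bracket_count(bracket):
--     result = 0
--     modified_bracket = list(bracket)
--     while is_empty(modified_bracket):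
--         for i in range(len(modified_bracket) - 1):
--             if modified_bracket[i] == '(' and modified_bracket[get_near_bracket(modified_bracket, i + 1)] == ')':
--                 result += 1
--                 modified_bracket[i] = '0'
--                 modified_bracket[get_near_bracket(modified_bracket, i + 1)] = '0'
--     result += modified_bracket.count('(') * 2
--     return result
-- ===== SOURCE B (Python) =====
-- def get_bracket_count(bracket):
--     # One linear pass: '0' is transparent, any other non-bracket char cuts the
--     # string into segments; count stack-matched pairs, every '(' left unmatched
--     # scores 2, every matched pair scores 1.
--     pairs = 0
--     depth = 0
--     opens = 0
--     for ch in bracket: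
--         if ch == '(':
--             depth += 1
--             opens += 1
--         elif ch == ')':
--             if depth:
--                 depth -= 1
--                 pairs += 1
--         elif ch != '0':
--             depth = 0
--     return 2 * opens - pairs
-- ===== Notes on version B (the rewrite author's own statement) =====
-- stated objective: alternative
-- what changed: Replaced the repeated rescan-and-erase fixpoint loop (re-running is_empty and a full index pass with an inner '0'-skipping scan after every erasure) by one left-to-right pass keeping a stack depth that counts matched pairs per blocker-delimited segment, plus the closed formula 2*opens - pairs.
import Mathlib
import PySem

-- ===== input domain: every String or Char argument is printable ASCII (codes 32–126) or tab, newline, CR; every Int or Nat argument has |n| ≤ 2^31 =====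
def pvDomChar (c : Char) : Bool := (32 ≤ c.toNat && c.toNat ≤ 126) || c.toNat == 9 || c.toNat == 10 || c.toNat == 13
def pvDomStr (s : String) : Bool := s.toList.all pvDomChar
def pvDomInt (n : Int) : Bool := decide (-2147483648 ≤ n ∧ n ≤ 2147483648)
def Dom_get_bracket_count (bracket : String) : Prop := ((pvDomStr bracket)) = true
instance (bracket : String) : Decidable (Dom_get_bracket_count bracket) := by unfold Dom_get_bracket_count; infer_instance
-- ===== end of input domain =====

-- B replaces A's repeated rescan-and-erase fixpoint loop by one linear pass with a
-- stack depth per blocker-delimited segment and the closed formula 2*opens - pairs.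

-- ===== PORT A =====
-- while bracket[currency] == '0' and currency < len(bracket) - 1: currency += 1
def nearGo (l : List Char) (c : Nat) : Nat :=
  if h : c < l.length then
    if l[c] = '0' ∧ c < l.length - 1 then nearGo l (c + 1) else c
  else c
termination_by l.length - c
decreasing_by omega

def nearBracket (l : List Char) (i : Nat) : Nat :=
  if i ≥ l.length then l.length - 1 else nearGo l i

-- the guard 'bracket[i] == '(' and bracket[get_near_bracket(bracket, i+1)] == ')''
-- (indices are in range at every call site, so getD is exact)
def condA (l : List Char) (i : Nat) : Bool :=
  l.getD i ' ' == '(' && l.getD (nearBracket l (i + 1)) ' ' == ')'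

def isEmptyA (l : List Char) : Bool :=
  (List.range (l.length - 1)).any (condA l)

def passStep (st : Int × List Char) (i : Nat) : Int × List Char :=
  if condA st.2 i then
    (st.1 + 1, (st.2.set i '0').set (nearBracket (st.2.set i '0') (i + 1)) '0')
  else st

def passA (r : Int) (l : List Char) : Int × List Char :=
  (List.range (l.length - 1)).foldl passStep (r, l)

-- the while loop; fuel length+1 suffices (each pass removes at least one '(')
def whileA : Nat → Int → List Char → Int
  | 0, r, l => r + (l.count '(' : Int) * 2
  | fuel + 1, r, l =>
      if isEmptyA l then whileA fuel (passA r l).1 (passA r l).2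
      else r + (l.count '(' : Int) * 2

def get_bracket_count (bracket : String) : Int :=
  whileA (bracket.toList.length + 1) 0 bracket.toList

-- ===== PORT B =====
-- state: (pairs, depth, opens)
def bStep (st : Int × Nat × Int) (ch : Char) : Int × Nat × Int :=
  if ch = '(' then (st.1, st.2.1 + 1, st.2.2 + 1)
  else if ch = ')' then (if st.2.1 > 0 then (st.1 + 1, st.2.1 - 1, st.2.2) else st)
  else if ch ≠ '0' then (st.1, 0, st.2.2)
  else st

def get_bracket_count_alt (bracket : String) : Int :=
  let st := bracket.toList.foldl bStep (0, 0, 0)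
  2 * st.2.2 - st.1

-- ===== PRECONDITION & SPEC =====
def Spec_get_bracket_count (bracket : String) (out : Int) : Prop := out = get_bracket_count_alt bracket
instance (bracket : String) (out : Int) : Decidable (Spec_get_bracket_count bracket out) := by unfold Spec_get_bracket_count; infer_instance

-- ===== CLAIM (what is proved, stated in full; the proofs are below) =====
def Claim_equal_get_bracket_count : Prop := ∀ (bracket : String), Dom_get_bracket_count bracket → Spec_get_bracket_count bracket (get_bracket_count bracket)

-- ===== LEMMAS AND PROOFS =====

-- depth/pairs of B's scan, as standalone recursions
def dstep (c : Char) (d : Nat) : Nat :=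
  if c = '(' then d + 1
  else if c = ')' then (if d > 0 then d - 1 else d)
  else if c ≠ '0' then 0 else d

def depthF : List Char → Nat → Nat
  | [], d => d
  | c :: t, d => depthF t (dstep c d)

def pairsF : List Char → Nat → Int
  | [], _ => 0
  | c :: t, d => (if c = ')' ∧ d > 0 then 1 else 0) + pairsF t (dstep c d)

def Mval (l : List Char) : Int := 2 * (l.count '(' : Int) - pairsF l 0

-- B's fold computes (pairsF, depthF, count '(')
theorem bFold_eq (l : List Char) : ∀ p d o,
    l.foldl bStep (p, d, o) = (p + pairsF l d, depthF l d, o + (l.count '(' : Int)) := by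
  induction l with
  | nil => intro p d o; simp [pairsF, depthF]
  | cons c t ih =>
    intro p d o
    by_cases h1 : c = '('
    · subst h1
      simp [List.foldl_cons, bStep, ih, pairsF, depthF, dstep, List.count_cons]
      ring_nf
    · by_cases h2 : c = ')'
      · subst h2
        by_cases h3 : d > 0 <;>
          simp [List.foldl_cons, bStep, ih, pairsF, depthF, dstep, h3, List.count_cons] <;> ring_nf
      · by_cases h4 : c = '0' <;>
          simp [List.foldl_cons, bStep, ih, pairsF, depthF, dstep, h1, h2, h4, List.count_cons]

theorem pairsF_append (u v : List Char) : ∀ d, pairsF (u ++ v) d = pairsF u d + pairsF v (depthF u d) := by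
  induction u with
  | nil => intro d; simp [pairsF, depthF]
  | cons c t ih => intro d; simp [pairsF, depthF, ih]; ring

theorem zeros_depthF (z : List Char) (hz : ∀ c ∈ z, c = '0') : ∀ d, depthF z d = d := by
  induction z with
  | nil => intro d; simp [depthF]
  | cons c t ih =>
    intro d
    have hc : c = '0' := hz c (by simp)
    simp [depthF, dstep, hc, ih fun c h => hz c (by simp [h])]

theorem zeros_pairsF (z : List Char) (hz : ∀ c ∈ z, c = '0') : ∀ d, pairsF z d = 0 := by
  induction z with
  | nil => intro d; simp [pairsF]
  | cons c t ih =>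
    intro d
    have hc : c = '0' := hz c (by simp)
    simp [pairsF, dstep, hc, ih fun c h => hz c (by simp [h])]

theorem zeros_count (z : List Char) (hz : ∀ c ∈ z, c = '0') : z.count '(' = 0 := by
  rw [List.count_eq_zero]
  intro h
  have := hz _ h
  simp at this

-- the shape "some '(' with only '0's up to the next ')'"
def HasMatch (l : List Char) : Prop :=
  ∃ u z v, l = u ++ '(' :: (z ++ ')' :: v) ∧ ∀ c ∈ z, c = '0'

theorem hasMatch_cons {t : List Char} (c : Char) (h : HasMatch t) : HasMatch (c :: t) := by
  obtain ⟨u, z, v, rfl, hz⟩ := h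
  exact ⟨c :: u, z, v, rfl, hz⟩

-- accounting across one erasure
theorem match_pairs (u z v : List Char) (hz : ∀ c ∈ z, c = '0') :
    pairsF (u ++ '(' :: (z ++ ')' :: v)) 0 = pairsF (u ++ '0' :: (z ++ '0' :: v)) 0 + 1 := by
  simp [pairsF_append, pairsF, depthF, dstep, zeros_depthF z hz, zeros_pairsF z hz]
  ring

theorem match_count (u z v : List Char) (hz : ∀ c ∈ z, c = '0') :
    (u ++ '(' :: (z ++ ')' :: v)).count '(' = (u ++ '0' :: (z ++ '0' :: v)).count '(' + 1 := by
  simp [List.count_append, zeros_count z hz]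
  omega

theorem match_Mval (u z v : List Char) (hz : ∀ c ∈ z, c = '0') :
    Mval (u ++ '(' :: (z ++ ')' :: v)) = Mval (u ++ '0' :: (z ++ '0' :: v)) + 1 := by
  unfold Mval
  rw [match_pairs u z v hz, match_count u z v hz]
  push_cast
  ring

-- first non-'0' element
def firstNZ : List Char → Option Char
  | [] => none
  | c :: t => if c = '0' then firstNZ t else some c

theorem firstNZ_split (l : List Char) : ∀ x, firstNZ l = some x →
    ∃ z v, l = z ++ x :: v ∧ ∀ c ∈ z, c = '0' := by
  induction l with
  | nil => intro x h; simp [firstNZ] at h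
  | cons c t ih =>
    intro x h
    by_cases hc : c = '0'
    · simp [firstNZ, hc] at h
      obtain ⟨z, v, rfl, hz⟩ := ih x h
      refine ⟨c :: z, v, rfl, ?_⟩
      intro a ha
      simp at ha
      rcases ha with rfl | h'
      · exact hc
      · exact hz a h'
    · simp [firstNZ, hc] at h
      exact ⟨[], t, by simp [h], by simp⟩

-- no match anywhere ⇒ the scan closes no pair
theorem noMatch_pairsF (l : List Char) : ∀ d, ¬ HasMatch l →
    (d = 0 ∨ firstNZ l ≠ some ')') → pairsF l d = 0 := by
  induction l with
  | nil => intro d _ _; simp [pairsF]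
  | cons c t ih =>
    intro d hnm hd
    have hnt : ¬ HasMatch t := fun h => hnm (hasMatch_cons c h)
    by_cases h0 : c = '0'
    · subst h0
      have : pairsF ('0' :: t) d = pairsF t d := by simp [pairsF, dstep]
      rw [this]
      refine ih d hnt ?_
      rcases hd with h | h
      · exact Or.inl h
      · exact Or.inr (by simpa [firstNZ] using h)
    · by_cases h1 : c = '('
      · subst h1
        have hne : firstNZ t ≠ some ')' := by
          intro hf
          obtain ⟨z, v, rfl, hz⟩ := firstNZ_split t ')' hf
          exact hnm ⟨[], z, v, by simp, hz⟩
        have hrw : pairsF ('(' :: t) d = pairsF t (d + 1) := by simp [pairsF, dstep]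
        rw [hrw]
        exact ih (d + 1) hnt (Or.inr hne)
      · by_cases h2 : c = ')'
        · subst h2
          have hdz : d = 0 := by
            rcases hd with h | h
            · exact h
            · exact absurd (by simp [firstNZ, h0]) h
          subst hdz
          have hrw : pairsF (')' :: t) 0 = pairsF t 0 := by simp [pairsF, dstep]
          rw [hrw]
          exact ih 0 hnt (Or.inl rfl)
        · have hrw : pairsF (c :: t) d = pairsF t 0 := by simp [pairsF, dstep, h0, h1, h2]
          rw [hrw]
          exact ih 0 hnt (Or.inl rfl)

-- nearGo: determined by "all '0' up to j, l[j] ≠ '0'"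
theorem nearGo_det (l : List Char) (j : Nat) (hj : j < l.length)
    (hja : l.getD j ' ' ≠ '0') :
    ∀ n c, c ≤ j → j - c = n → (∀ m, c ≤ m → m < j → l.getD m ' ' = '0') → nearGo l c = j := by
  intro n
  induction n with
  | zero =>
    intro c hc hn hall
    have hcj : c = j := by omega
    subst hcj
    rw [nearGo, dif_pos hj, if_neg]
    intro hcontra
    exact hja (by rw [List.getD_eq_getElem l ' ' hj]; exact hcontra.1)
  | succ n ih =>
    intro c hc hn hall
    have hcj : c < j := by omega
    have hcl : c < l.length := by omega
    rw [nearGo, dif_pos hcl, if_pos]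
    · exact ih (c + 1) (by omega) (by omega) (fun m hm1 hm2 => hall m (by omega) hm2)
    · refine ⟨?_, by omega⟩
      have := hall c (le_refl c) hcj
      rw [List.getD_eq_getElem l ' ' hcl] at this
      exact this

-- nearGo: basic properties of the result
theorem nearGo_spec (l : List Char) : ∀ c, c < l.length →
    c ≤ nearGo l c ∧ nearGo l c < l.length ∧
      ∀ m, c ≤ m → m < nearGo l c → l.getD m ' ' = '0' := by
  intro c
  induction hn : l.length - c generalizing c with
  | zero => intro h; omega
  | succ n ih =>
    intro hcl
    rw [nearGo, dif_pos hcl]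
    by_cases hb : l[c] = '0' ∧ c < l.length - 1
    · rw [if_pos hb]
      obtain ⟨h1, h2, h3⟩ := ih (c + 1) (by omega) (by omega)
      refine ⟨by omega, h2, ?_⟩
      intro m hm1 hm2
      rcases Nat.eq_or_lt_of_le hm1 with h | h
      · subst h; rw [List.getD_eq_getElem l ' ' hcl]; exact hb.1
      · exact h3 m h hm2
    · rw [if_neg hb]
      exact ⟨le_refl c, hcl, by omega⟩

-- set at the junction of an append
theorem set_append_len (u : List Char) (c x : Char) (r : List Char) :
    (u ++ c :: r).set u.length x = u ++ x :: r := by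
  induction u with
  | nil => simp
  | cons a t ih => simp [List.set, ih]

theorem getD_append_len (u : List Char) (c : Char) (r : List Char) :
    (u ++ c :: r).getD u.length ' ' = c := by
  rw [List.getD_eq_getElem _ ' ' (by simp only [List.length_append, List.length_cons]; omega)]
  simp

theorem getD_zeros (w : List Char) (hw : ∀ c ∈ w, c = '0') (k : Nat) (hk : k < w.length) :
    w.getD k ' ' = '0' := by
  rw [List.getD_eq_getElem w ' ' hk]
  exact hw _ (List.getElem_mem hk)

-- condA holds at the head of a match shape
theorem condA_of_match (u z v : List Char) (hz : ∀ c ∈ z, c = '0') :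
    condA (u ++ '(' :: (z ++ ')' :: v)) u.length = true := by
  have hlen : (u ++ '(' :: (z ++ ')' :: v)).length = u.length + 1 + z.length + 1 + v.length := by
    simp only [List.length_append, List.length_cons]; omega
  have hget : (u ++ '(' :: (z ++ ')' :: v)).getD u.length ' ' = '(' := getD_append_len u '(' _
  have hsplit : u ++ '(' :: (z ++ ')' :: v) = (u ++ '(' :: z) ++ ')' :: v := by simp
  have hlu : (u ++ '(' :: z).length = u.length + 1 + z.length := by
    simp only [List.length_append, List.length_cons]; omega
  have hj : (u ++ '(' :: (z ++ ')' :: v)).getD (u.length + 1 + z.length) ' ' = ')' := by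
    rw [hsplit, ← hlu]; exact getD_append_len _ ')' _
  have hnear : nearBracket (u ++ '(' :: (z ++ ')' :: v)) (u.length + 1) = u.length + 1 + z.length := by
    unfold nearBracket
    rw [if_neg (by omega)]
    refine nearGo_det _ _ (by omega) (by rw [hj]; decide) z.length (u.length + 1) (by omega) (by omega) ?_
    intro m hm1 hm2
    have hsp : u ++ '(' :: (z ++ ')' :: v) = (u ++ ['(']) ++ (z ++ ')' :: v) := by simp
    have h1 : (u ++ ['(']).length ≤ m := by simp only [List.length_append, List.length_cons, List.length_nil]; omega
    rw [hsp, List.getD_append_right _ _ _ _ h1]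
    have h2 : m - (u ++ ['(']).length < z.length := by
      simp only [List.length_append, List.length_cons, List.length_nil]; omega
    rw [List.getD_append _ _ _ _ h2]
    exact getD_zeros z hz _ h2
  unfold condA
  rw [hget, hnear, hj]
  decide

-- condA at i yields the match decomposition
theorem match_of_condA (l : List Char) (i : Nat) (hi : i + 1 < l.length)
    (hc : condA l i = true) :
    ∃ u z v, l = u ++ '(' :: (z ++ ')' :: v) ∧ (∀ c ∈ z, c = '0') ∧ u.length = i := by
  unfold condA at hc
  rw [Bool.and_eq_true, beq_iff_eq, beq_iff_eq] at hc
  obtain ⟨hci, hcj⟩ := hc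
  have hnb : nearBracket l (i + 1) = nearGo l (i + 1) := by
    unfold nearBracket; rw [if_neg (by omega)]
  set j := nearGo l (i + 1) with hjdef
  obtain ⟨hj1, hj2, hj3⟩ := nearGo_spec l (i + 1) (by omega)
  rw [hnb] at hcj
  refine ⟨l.take i, (l.drop (i + 1)).take (j - (i + 1)), l.drop (j + 1), ?_, ?_, ?_⟩
  · have hil : i < l.length := by omega
    conv_lhs => rw [← List.take_append_drop i l]
    congr 1
    rw [List.drop_eq_getElem_cons hil]
    have hgi : l[i] = '(' := by rwa [List.getD_eq_getElem l ' ' hil] at hci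
    rw [hgi]
    congr 1
    conv_lhs => rw [← List.take_append_drop (j - (i + 1)) (l.drop (i + 1))]
    congr 1
    rw [List.drop_drop]
    have hje : i + 1 + (j - (i + 1)) = j := by omega
    rw [hje, List.drop_eq_getElem_cons hj2]
    have hgj : l[j] = ')' := by rwa [List.getD_eq_getElem l ' ' hj2] at hcj
    rw [hgj]
  · intro c hcmem
    obtain ⟨k, hk, hkeq⟩ := List.getElem_of_mem hcmem
    have hk' : k < j - (i + 1) := by
      have h := hk
      simp only [List.length_take, List.length_drop] at h
      omega
    have hck : c = l[i + 1 + k]'(by omega) := by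
      rw [← hkeq, List.getElem_take, List.getElem_drop]
    rw [hck, ← List.getD_eq_getElem l ' ' (by omega)]
    exact hj3 (i + 1 + k) (by omega) (by omega)
  · simp only [List.length_take]
    omega

-- one passStep: the invariant and (on a live guard) strict '(' decrease
theorem passStep_inv (r : Int) (l : List Char) (i : Nat) (hi : i + 1 < l.length) :
    (passStep (r, l) i).2.length = l.length ∧
    (passStep (r, l) i).1 + Mval (passStep (r, l) i).2 = r + Mval l ∧
    (passStep (r, l) i).2.count '(' ≤ l.count '(' ∧
    (condA l i = true → (passStep (r, l) i).2.count '(' < l.count '(') := by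
  by_cases hc : condA l i = true
  · obtain ⟨u, z, v, rfl, hz, hu⟩ := match_of_condA l i hi hc
    have hz0 : ∀ c ∈ '0' :: z, c = '0' := by
      intro c hcm
      rcases List.mem_cons.mp hcm with rfl | hm
      · rfl
      · exact hz c hm
    have hL : (u ++ '(' :: (z ++ ')' :: v)).length = i + 1 + z.length + 1 + v.length := by
      simp only [List.length_append, List.length_cons]; omega
    have hL0 : (u ++ '0' :: (z ++ ')' :: v)).length = i + 1 + z.length + 1 + v.length := by
      simp only [List.length_append, List.length_cons]; omega
    have hset1 : (u ++ '(' :: (z ++ ')' :: v)).set i '0' = u ++ '0' :: (z ++ ')' :: v) := by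
      rw [← hu]; exact set_append_len u '(' '0' _
    have hlu0 : (u ++ '0' :: z).length = i + 1 + z.length := by
      simp only [List.length_append, List.length_cons]; omega
    have hjget : (u ++ '0' :: (z ++ ')' :: v)).getD (i + 1 + z.length) ' ' = ')' := by
      have hsp : u ++ '0' :: (z ++ ')' :: v) = (u ++ '0' :: z) ++ ')' :: v := by simp
      rw [hsp, ← hlu0]
      exact getD_append_len _ ')' _
    have hnear2 : nearBracket (u ++ '0' :: (z ++ ')' :: v)) (i + 1) = i + 1 + z.length := by
      unfold nearBracket
      rw [if_neg (by omega)]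
      refine nearGo_det _ _ (by omega) (by rw [hjget]; decide) z.length (i + 1) (by omega) (by omega) ?_
      intro m hm1 hm2
      have hsp : u ++ '0' :: (z ++ ')' :: v) = u ++ (('0' :: z) ++ ')' :: v) := by simp
      have h1 : u.length ≤ m := by omega
      rw [hsp, List.getD_append_right _ _ _ _ h1]
      have h2 : m - u.length < ('0' :: z).length := by simp only [List.length_cons]; omega
      rw [List.getD_append _ _ _ _ h2]
      exact getD_zeros _ hz0 _ h2
    have hset2 : (u ++ '0' :: (z ++ ')' :: v)).set (i + 1 + z.length) '0'
        = u ++ '0' :: (z ++ '0' :: v) := by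
      have h1 : u ++ '0' :: (z ++ ')' :: v) = (u ++ '0' :: z) ++ ')' :: v := by simp
      have h2 : u ++ '0' :: (z ++ '0' :: v) = (u ++ '0' :: z) ++ '0' :: v := by simp
      rw [h1, h2, ← hlu0, set_append_len]
    have hstep : passStep (r, u ++ '(' :: (z ++ ')' :: v)) i = (r + 1, u ++ '0' :: (z ++ '0' :: v)) := by
      unfold passStep
      dsimp only
      rw [if_pos hc, hset1, hnear2, hset2]
    rw [hstep]
    dsimp only
    refine ⟨?_, ?_, ?_, fun _ => ?_⟩
    · simp only [List.length_append, List.length_cons]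
    · rw [match_Mval u z v hz]; ring
    · rw [match_count u z v hz]; omega
    · rw [match_count u z v hz]; omega
  · have hid : passStep (r, l) i = (r, l) := by unfold passStep; dsimp only; rw [if_neg hc]
    rw [hid]
    exact ⟨rfl, rfl, le_refl _, fun h => absurd h hc⟩

-- the fold over any list of in-range indices keeps the invariant
theorem pass_fold_inv (idxs : List Nat) : ∀ (r : Int) (l : List Char),
    (∀ i ∈ idxs, i + 1 < l.length) →
    (idxs.foldl passStep (r, l)).2.length = l.length ∧
    (idxs.foldl passStep (r, l)).1 + Mval (idxs.foldl passStep (r, l)).2 = r + Mval l ∧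
    (idxs.foldl passStep (r, l)).2.count '(' ≤ l.count '(' := by
  induction idxs with
  | nil => intro r l _; exact ⟨rfl, rfl, le_refl _⟩
  | cons i rest ih =>
    intro r l hb
    obtain ⟨h1, h2, h3, _⟩ := passStep_inv r l i (hb i (by simp))
    simp only [List.foldl_cons]
    obtain ⟨g1, g2, g3⟩ := ih (passStep (r, l) i).1 (passStep (r, l) i).2
      (fun j hj => h1 ▸ hb j (by simp [hj]))
    refine ⟨?_, ?_, ?_⟩
    · rw [← h1]
      have : ((passStep (r, l) i).1, (passStep (r, l) i).2) = passStep (r, l) i := rfl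
      rw [this] at g1
      exact g1
    · have : ((passStep (r, l) i).1, (passStep (r, l) i).2) = passStep (r, l) i := rfl
      rw [this] at g2
      rw [g2, h2]
    · have : ((passStep (r, l) i).1, (passStep (r, l) i).2) = passStep (r, l) i := rfl
      rw [this] at g3
      exact le_trans g3 h3

theorem pass_fold_lt (idxs : List Nat) : ∀ (r : Int) (l : List Char),
    (∀ i ∈ idxs, i + 1 < l.length) →
    (∃ i ∈ idxs, condA l i = true) →
    (idxs.foldl passStep (r, l)).2.count '(' < l.count '(' := by
  induction idxs with
  | nil => intro r l _ h; simp at h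
  | cons i rest ih =>
    intro r l hb hw
    obtain ⟨h1, _, h3, h4⟩ := passStep_inv r l i (hb i (by simp))
    simp only [List.foldl_cons]
    by_cases hc : condA l i = true
    · obtain ⟨_, _, g3⟩ := pass_fold_inv rest (passStep (r, l) i).1 (passStep (r, l) i).2
        (fun j hj => h1 ▸ hb j (by simp [hj]))
      have : ((passStep (r, l) i).1, (passStep (r, l) i).2) = passStep (r, l) i := rfl
      rw [this] at g3
      exact lt_of_le_of_lt g3 (h4 hc)
    · have hid : passStep (r, l) i = (r, l) := by unfold passStep; dsimp only; rw [if_neg hc]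
      rw [hid]
      refine ih r l (fun j hj => hb j (by simp [hj])) ?_
      obtain ⟨j, hj, hcj⟩ := hw
      rcases List.mem_cons.mp hj with rfl | hj'
      · exact absurd hcj hc
      · exact ⟨j, hj', hcj⟩

theorem passA_inv (r : Int) (l : List Char) :
    (passA r l).1 + Mval (passA r l).2 = r + Mval l ∧
    (isEmptyA l = true → (passA r l).2.count '(' < l.count '(') := by
  unfold passA
  have hb : ∀ i ∈ List.range (l.length - 1), i + 1 < l.length := by
    intro i hi
    rw [List.mem_range] at hi
    omega
  refine ⟨(pass_fold_inv _ r l hb).2.1, fun he => ?_⟩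
  apply pass_fold_lt _ r l hb
  unfold isEmptyA at he
  rw [List.any_eq_true] at he
  obtain ⟨i, hi, hci⟩ := he
  exact ⟨i, hi, hci⟩

-- isEmptyA = false ⇒ no match shape exists
theorem noMatch_of_isEmptyA_false (l : List Char) (h : isEmptyA l = false) : ¬ HasMatch l := by
  intro hm
  obtain ⟨u, z, v, rfl, hz⟩ := hm
  have hc := condA_of_match u z v hz
  unfold isEmptyA at h
  rw [List.any_eq_false] at h
  have hmem : u.length ∈ List.range ((u ++ '(' :: (z ++ ')' :: v)).length - 1) := by
    rw [List.mem_range]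
    simp only [List.length_append, List.length_cons]
    omega
  exact absurd hc (by simpa using h u.length hmem)

theorem whileA_eq (fuel : Nat) : ∀ (r : Int) (l : List Char), l.count '(' < fuel →
    whileA fuel r l = r + Mval l := by
  induction fuel with
  | zero => intro r l h; omega
  | succ n ih =>
    intro r l h
    rw [whileA]
    by_cases he : isEmptyA l = true
    · rw [if_pos he]
      obtain ⟨hinv, hlt⟩ := passA_inv r l
      rw [ih (passA r l).1 (passA r l).2 (by have := hlt he; omega), hinv]
    · rw [if_neg he]
      have hnm := noMatch_of_isEmptyA_false l (by simpa using he)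
      have hp : pairsF l 0 = 0 := noMatch_pairsF l 0 hnm (Or.inl rfl)
      unfold Mval
      rw [hp]
      ring

-- ===== VERDICT (by name: the statement is the Claim_ definition above) =====
theorem get_bracket_count_spec : Claim_equal_get_bracket_count := by
  intro bracket _
  unfold Spec_get_bracket_count get_bracket_count get_bracket_count_alt
  rw [whileA_eq (bracket.toList.length + 1) 0 bracket.toList
    (by have := List.count_le_length (l := bracket.toList) (a := '('); omega)]
  rw [bFold_eq bracket.toList 0 0 0]
  unfold Mval
  push_cast
  ring
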